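-- pv_equiv track=rewrite | github.com/eric-sclafani/gram2vec | gram2vec/vectorizer.py | insert_sentence_boundaries
-- ===== SOURCE A (Python) =====
-- from typing import Optional, Tuple, List, Dict, Callable
--
-- def insert_sentence_boundaries(spans:List[Tuple[int,int]],
--                                tokens:List[str]
--                                ) -> List[str]:
--     """Inserts sentence boundaries into a list of tokens"""
--     new_tokens = []
--
--     for i, item in enumerate(tokens):
--         for start, end in spans:
--             if i == start:
--                 new_tokens.append("BOS")
--             elif i == end:
--                 new_tokens.append("EOS")
--         new_tokens.append(item)
--     new_tokens.append("EOS")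
--     return new_tokens
-- ===== SOURCE B (Python) =====
-- def insert_sentence_boundaries(spans, tokens):
--     """Inserts sentence boundaries into a list of tokens"""
--     marks = {}
--     for start, end in spans:
--         marks.setdefault(start, []).append("BOS")
--         if end != start:
--             marks.setdefault(end, []).append("EOS")
--     out = []
--     for i, tok in enumerate(tokens):
--         out += marks.get(i, [])
--         out.append(tok)
--     out.append("EOS")
--     return out
-- ===== Notes on version B (the rewrite author's own statement) =====
-- stated objective: faster
-- what changed: Replaces A's inner scan over all spans at every token index with a dict index->markers built once from the spans, then a single pass over the tokens.
import Mathlib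
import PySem

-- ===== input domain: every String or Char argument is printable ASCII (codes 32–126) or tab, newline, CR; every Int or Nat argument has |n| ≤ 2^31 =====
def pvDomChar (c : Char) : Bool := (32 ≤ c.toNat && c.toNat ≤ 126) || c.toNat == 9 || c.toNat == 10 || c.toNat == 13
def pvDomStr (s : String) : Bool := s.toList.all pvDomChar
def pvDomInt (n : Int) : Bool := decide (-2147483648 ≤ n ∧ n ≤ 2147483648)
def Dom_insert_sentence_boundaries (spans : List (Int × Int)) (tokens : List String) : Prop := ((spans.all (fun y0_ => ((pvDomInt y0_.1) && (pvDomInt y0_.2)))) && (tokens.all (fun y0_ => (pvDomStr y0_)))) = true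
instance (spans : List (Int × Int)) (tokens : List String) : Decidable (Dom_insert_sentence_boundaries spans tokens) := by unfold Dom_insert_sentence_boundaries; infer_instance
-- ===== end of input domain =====

-- B replaces A's inner scan over all spans at every token index by a dict
-- index → markers built once from the spans, then a single pass over the tokens.


-- ===== PORT A =====
-- for i, item in enumerate(tokens): for start, end in spans: append BOS/EOS; append item; final append("EOS")
def insert_sentence_boundaries (spans : List (Int × Int)) (tokens : List String) : List String :=
  ((PySem.List.enumerate tokens 0).foldl (fun nt p =>
    (spans.foldl (fun nt' se =>
      if p.1 = se.1 then nt' ++ ["BOS"]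
      else if p.1 = se.2 then nt' ++ ["EOS"]
      else nt') nt) ++ [p.2]) []) ++ ["EOS"]

-- ===== PORT B =====
-- marks.setdefault(k, []).append(v)  ==  marks.modify k [] (· ++ [v])  (exact: append to the entry, [] if absent)
def ISB.buildMarks (spans : List (Int × Int)) : PySem.Dict Int (List String) :=
  spans.foldl (fun d se =>
    let d1 := d.modify se.1 [] (· ++ ["BOS"])
    if se.2 ≠ se.1 then d1.modify se.2 [] (· ++ ["EOS"]) else d1) PySem.Dict.empty

def insert_sentence_boundaries_alt (spans : List (Int × Int)) (tokens : List String) : List String :=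
  let marks := ISB.buildMarks spans
  ((PySem.List.enumerate tokens 0).foldl (fun out p =>
    (out ++ marks.getD p.1 []) ++ [p.2]) []) ++ ["EOS"]

-- ===== PRECONDITION & SPEC =====
def Spec_insert_sentence_boundaries (spans : List (Int × Int)) (tokens : List String) (out : List String) : Prop := out = insert_sentence_boundaries_alt spans tokens
instance (spans : List (Int × Int)) (tokens : List String) (out : List String) : Decidable (Spec_insert_sentence_boundaries spans tokens out) := by unfold Spec_insert_sentence_boundaries; infer_instance

-- ===== CLAIM (what is proved, stated in full; the proofs are below) =====
def Claim_equal_insert_sentence_boundaries : Prop := ∀ (spans : List (Int × Int)) (tokens : List String), Dom_insert_sentence_boundaries spans tokens → Spec_insert_sentence_boundaries spans tokens (insert_sentence_boundaries spans tokens)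

-- ===== LEMMAS AND PROOFS =====

-- the markers A's inner loop emits at index i
def ISB.marks (spans : List (Int × Int)) (i : Int) : List String :=
  spans.flatMap (fun se => if i = se.1 then ["BOS"] else if i = se.2 then ["EOS"] else [])

-- A's inner loop appends exactly ISB.marks
theorem ISB.foldl_inner (spans : List (Int × Int)) (i : Int) (nt : List String) :
    spans.foldl (fun nt' se =>
      if i = se.1 then nt' ++ ["BOS"]
      else if i = se.2 then nt' ++ ["EOS"]
      else nt') nt = nt ++ ISB.marks spans i := by
  induction spans generalizing nt with
  | nil => simp [ISB.marks]
  | cons se rest ih =>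
      simp only [List.foldl_cons, ISB.marks, List.flatMap_cons, ih]
      split_ifs <;> simp

-- each span contributes up to two (key, marker) pairs, in order
def ISB.pairs (spans : List (Int × Int)) : List (Int × String) :=
  spans.flatMap (fun se => (se.1, "BOS") :: (if se.2 ≠ se.1 then [(se.2, "EOS")] else []))

theorem ISB.buildMarks_eq_pairs_foldl (spans : List (Int × Int)) :
    ISB.buildMarks spans
      = (ISB.pairs spans).foldl (fun d p => d.modify p.1 [] (· ++ [p.2])) PySem.Dict.empty := by
  unfold ISB.buildMarks
  suffices h : ∀ (d : PySem.Dict Int (List String)),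
      spans.foldl (fun d se =>
        let d1 := d.modify se.1 [] (· ++ ["BOS"])
        if se.2 ≠ se.1 then d1.modify se.2 [] (· ++ ["EOS"]) else d1) d
      = (ISB.pairs spans).foldl (fun d p => d.modify p.1 [] (· ++ [p.2])) d from h _
  induction spans with
  | nil => intro d; simp [ISB.pairs]
  | cons se rest ih =>
      intro d
      rw [List.foldl_cons, ih]
      have hp : ISB.pairs (se :: rest)
          = ((se.1, "BOS") :: (if se.2 ≠ se.1 then [(se.2, "EOS")] else [])) ++ ISB.pairs rest := by
        simp [ISB.pairs]
      rw [hp, List.foldl_append]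
      by_cases h : se.2 = se.1 <;> simp [h]

-- the head span's pairs, filtered at i, are exactly A's marker at i for that span
theorem ISB.filter_head (se : Int × Int) (i : Int) :
    (List.filter (fun p => p.1 == i)
        ((se.1, "BOS") :: (if se.2 ≠ se.1 then [(se.2, "EOS")] else []))).map (fun p => p.2)
      = (if i = se.1 then ["BOS"] else if i = se.2 then ["EOS"] else []) := by
  by_cases h1 : i = se.1
  · subst h1
    by_cases h3 : se.2 = se.1 <;> simp [List.filter, h3]
  · have h1' : (se.1 == i) = false := beq_eq_false_iff_ne.mpr (Ne.symm h1)
    by_cases h2 : i = se.2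
    · have h3 : se.2 ≠ se.1 := fun h => h1 (h2.trans h)
      simp [List.filter, h1', h2.symm, h1]
    · have h2' : (se.2 == i) = false := beq_eq_false_iff_ne.mpr (Ne.symm h2)
      by_cases h3 : se.2 = se.1 <;> simp [List.filter, h3, h1', h2', h1, h2]

-- the dict lookup at i is exactly the markers A emits at i
theorem ISB.getD_buildMarks (spans : List (Int × Int)) (i : Int) :
    (ISB.buildMarks spans).getD i [] = ISB.marks spans i := by
  rw [ISB.buildMarks_eq_pairs_foldl,
      PySem.Dict.getD_foldl_modify_append (ISB.pairs spans) PySem.Dict.empty i]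
  simp only [PySem.Dict.getD_empty, List.nil_append]
  induction spans with
  | nil => simp [ISB.pairs, ISB.marks]
  | cons se rest ih =>
      have hp : ISB.pairs (se :: rest)
          = ((se.1, "BOS") :: (if se.2 ≠ se.1 then [(se.2, "EOS")] else [])) ++ ISB.pairs rest := by
        simp [ISB.pairs]
      rw [hp, List.filter_append, List.map_append, ih, ISB.filter_head]
      simp [ISB.marks]

-- ===== VERDICT (by name: the statement is the Claim_ definition above) =====
theorem insert_sentence_boundaries_spec : Claim_equal_insert_sentence_boundaries := by
  intro spans tokens _
  unfold Spec_insert_sentence_boundaries insert_sentence_boundaries insert_sentence_boundaries_alt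
  apply congrArg (· ++ ["EOS"])
  apply List.foldl_ext
  intro nt p _
  rw [ISB.foldl_inner, ISB.getD_buildMarks]
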